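-- pv_equiv track=rewrite | github.com/tahmid-tanzim/problem-solving | codility/Triangle.py | findTriangle
-- ===== SOURCE A (Python) =====
-- from typing import List
--
-- def findTriangle(A: List[int]) -> int:
--     n = len(A)
--     for p in range(n - 2):
--         for q in range(p + 1, n - 1):
--             for r in range(q + 1, n):
--                 if A[p] + A[q] > A[r] and A[q] + A[r] > A[p] and A[r] + A[p] > A[q]:
--                     return 1
--     return 0
-- ===== SOURCE B (Python) =====
-- from typing import List
--
-- def findTriangle(A: List[int]) -> int:
--     s = sorted(A)
--     for i in range(len(s) - 2):
--         if s[i] + s[i + 1] > s[i + 2]: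
--             return 1
--     return 0
-- ===== Notes on version B (the rewrite author's own statement) =====
-- stated objective: faster
-- what changed: Replaces the O(n^3) brute-force scan over all index triples with sort-then-scan: after sorting, a triangle triple exists iff some three consecutive elements satisfy a+b>c, so one linear pass over the sorted list suffices.
import Mathlib
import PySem

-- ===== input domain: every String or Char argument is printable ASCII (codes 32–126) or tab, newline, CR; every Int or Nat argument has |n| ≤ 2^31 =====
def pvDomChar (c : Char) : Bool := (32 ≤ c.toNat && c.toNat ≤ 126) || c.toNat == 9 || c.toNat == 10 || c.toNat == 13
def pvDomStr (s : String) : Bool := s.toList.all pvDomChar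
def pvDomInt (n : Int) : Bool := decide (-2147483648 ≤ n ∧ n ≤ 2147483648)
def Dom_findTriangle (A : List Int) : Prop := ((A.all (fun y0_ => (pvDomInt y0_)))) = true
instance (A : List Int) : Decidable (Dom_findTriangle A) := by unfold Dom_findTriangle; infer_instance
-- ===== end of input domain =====

-- B replaces A's O(n^3) scan over all index triples by sort-then-scan of consecutive triples; same return value proved for all inputs.


-- ===== PORT A =====
-- triple nested `for p/q/r in range(...)` with early `return 1` = short-circuit `.any`; n = len(A) inlined
def findTriangle (A : List Int) : Int :=
  if (PySem.List.pyRange 0 ((A.length : Int) - 2) 1).any (fun p =>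
       (PySem.List.pyRange (p + 1) ((A.length : Int) - 1) 1).any (fun q =>
         (PySem.List.pyRange (q + 1) (A.length : Int) 1).any (fun r =>
           decide (PySem.List.pyGetD A p 0 + PySem.List.pyGetD A q 0 > PySem.List.pyGetD A r 0)
           && decide (PySem.List.pyGetD A q 0 + PySem.List.pyGetD A r 0 > PySem.List.pyGetD A p 0)
           && decide (PySem.List.pyGetD A r 0 + PySem.List.pyGetD A p 0 > PySem.List.pyGetD A q 0))))
  then 1 else 0

-- ===== PORT B =====
-- `s = sorted(A)` (inlined), then one pass over consecutive triples with early `return 1`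
def findTriangle_alt (A : List Int) : Int :=
  if (PySem.List.pyRange 0 (((PySem.List.sorted A (fun x => x) false).length : Int) - 2) 1).any (fun i =>
       decide (PySem.List.pyGetD (PySem.List.sorted A (fun x => x) false) i 0
         + PySem.List.pyGetD (PySem.List.sorted A (fun x => x) false) (i + 1) 0
         > PySem.List.pyGetD (PySem.List.sorted A (fun x => x) false) (i + 2) 0))
  then 1 else 0

-- ===== PRECONDITION & SPEC =====
def Spec_findTriangle (A : List Int) (out : Int) : Prop := out = findTriangle_alt A
instance (A : List Int) (out : Int) : Decidable (Spec_findTriangle A out) := by unfold Spec_findTriangle; infer_instance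

-- ===== CLAIM (what is proved, stated in full; the proofs are below) =====
def Claim_equal_findTriangle : Prop := ∀ (A : List Int), Dom_findTriangle A → Spec_findTriangle A (findTriangle A)

-- ===== LEMMAS AND PROOFS =====

-- the (fully symmetric) triangle condition of A's inner test
def triOK (a b c : Int) : Prop := a + b > c ∧ b + c > a ∧ c + a > b

lemma triOK_iff_sum (a b c : Int) : triOK a b c ↔ ∀ e ∈ [a, b, c], 2 * e < a + b + c := by
  simp [triOK]; omega

-- triOK transfers across any permutation of a 3-element list
lemma triOK_perm {l : List Int} {a b c : Int} (hp : l.Perm [a, b, c]) (h : triOK a b c) :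
    ∃ x y z, l = [x, y, z] ∧ triOK x y z := by
  have hlen : l.length = 3 := by simpa using hp.length_eq
  match l, hlen with
  | [x, y, z], _ =>
    refine ⟨x, y, z, rfl, ?_⟩
    have hsum : x + (y + z) = a + (b + c) := by simpa using hp.sum_eq
    rw [triOK_iff_sum]
    intro e he
    have hmem : e ∈ [a, b, c] := hp.subset he
    have := (triOK_iff_sum a b c).mp h e hmem
    omega

-- existence of a triangle triple, phrased on sublists (order-free via triOK's symmetry)
def hasTri (L : List Int) : Prop := ∃ t, t.Sublist L ∧ ∃ x y z, t = [x, y, z] ∧ triOK x y z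

lemma hasTri_of_perm {L M : List Int} (hp : L.Perm M) (h : hasTri L) : hasTri M := by
  obtain ⟨t, hsub, x, y, z, rfl, htri⟩ := h
  have hsp : List.Subperm [x, y, z] M := (hsub.subperm).trans hp.subperm
  obtain ⟨l, hlp, hlsub⟩ := hsp
  obtain ⟨x', y', z', rfl, htri'⟩ := triOK_perm hlp htri
  exact ⟨_, hlsub, x', y', z', rfl, htri'⟩

lemma hasTri_iff_indices (L : List Int) :
    hasTri L ↔ ∃ p q r : ℕ, ∃ h : p < q ∧ q < r ∧ r < L.length,
      triOK (L[p]'(by omega)) (L[q]'(by omega)) (L[r]'(by omega)) := by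
  constructor
  · rintro ⟨t, hsub, x, y, z, rfl, htri⟩
    obtain ⟨is, his, hpw⟩ := List.sublist_eq_map_getElem hsub
    match is, his, hpw with
    | [i, j, k], his, hpw =>
      simp only [List.map_cons, List.map_nil, List.cons.injEq, and_true] at his
      obtain ⟨hx, hy, hz⟩ := his
      simp only [List.pairwise_cons, List.mem_cons] at hpw
      have hij : (i : ℕ) < j := by have := hpw.1 j; simp_all
      have hjk : (j : ℕ) < k := by have := hpw.2.1 k; simp_all
      refine ⟨i, j, k, ⟨hij, hjk, k.isLt⟩, ?_⟩
      have ei : L[(i : ℕ)]'(by omega) = x := hx.symm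
      have ej : L[(j : ℕ)]'(by omega) = y := hy.symm
      have ek : L[(k : ℕ)]'(by omega) = z := hz.symm
      rw [ei, ej, ek]; exact htri
  · rintro ⟨p, q, r, ⟨hpq, hqr, hr⟩, htri⟩
    refine ⟨[L[p]'(by omega), L[q]'(by omega), L[r]'(by omega)], ?_, _, _, _, rfl, htri⟩
    have hpw : List.Pairwise (fun x1 x2 => x1 < x2)
        ([⟨p, by omega⟩, ⟨q, by omega⟩, ⟨r, hr⟩] : List (Fin L.length)) := by
      refine List.Pairwise.cons ?_ (List.Pairwise.cons ?_ (List.pairwise_singleton _ _))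
      · intro b hb
        simp only [List.mem_cons, List.not_mem_nil, or_false] at hb
        rcases hb with rfl | rfl <;> exact Fin.mk_lt_mk.mpr (by omega)
      · intro b hb
        simp only [List.mem_cons, List.not_mem_nil, or_false] at hb
        rcases hb with rfl
        exact Fin.mk_lt_mk.mpr (by omega)
    simpa using List.map_getElem_sublist hpw

-- abbreviation for B's sorted list
def srt (A : List Int) : List Int := PySem.List.sorted A (fun x => x) false

lemma srt_mono (A : List Int) {i j : ℕ} (hij : i ≤ j) (hj : j < (srt A).length) :
    (srt A)[i]'(by omega) ≤ (srt A)[j] := by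
  simp only [srt] at hj ⊢
  rcases Nat.lt_or_ge i j with h | h
  · exact List.pairwise_iff_getElem.mp (PySem.List.sorted_pairwise A (fun x => x)) i j (by omega) hj h
  · have : i = j := by omega
    subst this; rfl

-- on the sorted list, hasTri ↔ some consecutive triple works
lemma hasTri_srt_iff (A : List Int) :
    hasTri (srt A) ↔ ∃ i : ℕ, ∃ h : i + 2 < (srt A).length,
      (srt A)[i]'(by omega) + (srt A)[i+1]'(by omega) > (srt A)[i+2] := by
  constructor
  · intro h
    obtain ⟨p, q, r, ⟨hpq, hqr, hr⟩, htri⟩ := (hasTri_iff_indices _).mp h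
    refine ⟨r - 2, by omega, ?_⟩
    have h1 : (srt A)[p]'(by omega) ≤ (srt A)[r-2]'(by omega) := srt_mono A (by omega) (by omega)
    have h2 : (srt A)[q]'(by omega) ≤ (srt A)[r-1]'(by omega) := srt_mono A (by omega) (by omega)
    have e1 : r - 2 + 1 = r - 1 := by omega
    have e2 : r - 2 + 2 = r := by omega
    simp only [e1, e2]
    have := htri.1
    omega
  · rintro ⟨i, h, hlt⟩
    rw [hasTri_iff_indices]
    have h1 : (srt A)[i]'(by omega) ≤ (srt A)[i+1]'(by omega) := srt_mono A (by omega) (by omega)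
    have h2 : (srt A)[i+1]'(by omega) ≤ (srt A)[i+2] := srt_mono A (by omega) h
    exact ⟨i, i+1, i+2, ⟨by omega, by omega, h⟩, hlt, by omega, by omega⟩

-- A's loop condition ↔ hasTri A
lemma condA_iff (A : List Int) :
    ((PySem.List.pyRange 0 ((A.length : Int) - 2) 1).any (fun p =>
       (PySem.List.pyRange (p + 1) ((A.length : Int) - 1) 1).any (fun q =>
         (PySem.List.pyRange (q + 1) (A.length : Int) 1).any (fun r =>
           decide (PySem.List.pyGetD A p 0 + PySem.List.pyGetD A q 0 > PySem.List.pyGetD A r 0)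
           && decide (PySem.List.pyGetD A q 0 + PySem.List.pyGetD A r 0 > PySem.List.pyGetD A p 0)
           && decide (PySem.List.pyGetD A r 0 + PySem.List.pyGetD A p 0 > PySem.List.pyGetD A q 0)))) = true)
    ↔ hasTri A := by
  rw [hasTri_iff_indices]
  simp only [List.any_eq_true, PySem.List.mem_pyRange_one, Bool.and_eq_true, decide_eq_true_eq]
  constructor
  · rintro ⟨p, ⟨hp0, hp⟩, q, ⟨hq0, hq⟩, r, ⟨hr0, hr⟩, ⟨h1, h2⟩, h3⟩
    have gp : PySem.List.pyGetD A p 0 = A[p.toNat]'(by clear h1 h2 h3; omega) :=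
      PySem.List.pyGetD_eq_getElem A 0 (by clear h1 h2 h3; omega) (by clear h1 h2 h3; omega)
    have gq : PySem.List.pyGetD A q 0 = A[q.toNat]'(by clear h1 h2 h3; omega) :=
      PySem.List.pyGetD_eq_getElem A 0 (by clear h1 h2 h3; omega) (by clear h1 h2 h3; omega)
    have gr : PySem.List.pyGetD A r 0 = A[r.toNat]'(by clear h1 h2 h3; omega) :=
      PySem.List.pyGetD_eq_getElem A 0 (by clear h1 h2 h3; omega) (by clear h1 h2 h3; omega)
    rw [gp, gq, gr] at h1 h2 h3
    exact ⟨p.toNat, q.toNat, r.toNat, ⟨by omega, by omega, by omega⟩, h1, h2, h3⟩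
  · rintro ⟨p, q, r, ⟨hpq, hqr, hr⟩, h1, h2, h3⟩
    have gp : PySem.List.pyGetD A (p : Int) 0 = A[p]'(by omega) := by
      rw [PySem.List.pyGetD_eq_getElem A 0 (by omega) (by omega)]; simp
    have gq : PySem.List.pyGetD A (q : Int) 0 = A[q]'(by omega) := by
      rw [PySem.List.pyGetD_eq_getElem A 0 (by omega) (by omega)]; simp
    have gr : PySem.List.pyGetD A (r : Int) 0 = A[r]'(by omega) := by
      rw [PySem.List.pyGetD_eq_getElem A 0 (by omega) (by omega)]; simp
    refine ⟨(p : Int), ⟨by omega, by omega⟩, (q : Int), ⟨by omega, by omega⟩,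
      (r : Int), ⟨by omega, by omega⟩, ?_⟩
    rw [gp, gq, gr]
    exact ⟨⟨h1, h2⟩, h3⟩
-- B's loop condition ↔ the consecutive-triple condition on srt A
lemma condB_iff (A : List Int) :
    ((PySem.List.pyRange 0 (((srt A).length : Int) - 2) 1).any (fun i =>
       decide (PySem.List.pyGetD (srt A) i 0 + PySem.List.pyGetD (srt A) (i + 1) 0 >
         PySem.List.pyGetD (srt A) (i + 2) 0)) = true)
    ↔ ∃ i : ℕ, ∃ h : i + 2 < (srt A).length,
      (srt A)[i]'(by omega) + (srt A)[i+1]'(by omega) > (srt A)[i+2] := by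
  simp only [List.any_eq_true, PySem.List.mem_pyRange_one, decide_eq_true_eq]
  constructor
  · rintro ⟨i, ⟨hi0, hi⟩, hlt⟩
    have g0 : PySem.List.pyGetD (srt A) i 0 = (srt A)[i.toNat]'(by omega) :=
      PySem.List.pyGetD_eq_getElem (srt A) 0 (by omega) (by omega)
    have g1 : PySem.List.pyGetD (srt A) (i + 1) 0 = (srt A)[i.toNat + 1]'(by omega) := by
      rw [PySem.List.pyGetD_eq_getElem (srt A) 0 (by omega) (by omega)]
      congr 1; omega
    have g2 : PySem.List.pyGetD (srt A) (i + 2) 0 = (srt A)[i.toNat + 2]'(by omega) := by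
      rw [PySem.List.pyGetD_eq_getElem (srt A) 0 (by omega) (by omega)]
      congr 1; omega
    rw [g0, g1, g2] at hlt
    exact ⟨i.toNat, by omega, hlt⟩
  · rintro ⟨i, h, hlt⟩
    have g0 : PySem.List.pyGetD (srt A) (i : Int) 0 = (srt A)[i]'(by omega) := by
      rw [PySem.List.pyGetD_eq_getElem (srt A) 0 (by omega) (by omega)]; simp
    have g1 : PySem.List.pyGetD (srt A) ((i : Int) + 1) 0 = (srt A)[i + 1]'(by omega) := by
      rw [PySem.List.pyGetD_eq_getElem (srt A) 0 (by omega) (by omega)]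
      congr 1
    have g2 : PySem.List.pyGetD (srt A) ((i : Int) + 2) 0 = (srt A)[i + 2]'(by omega) := by
      rw [PySem.List.pyGetD_eq_getElem (srt A) 0 (by omega) (by omega)]
      congr 1
    refine ⟨(i : Int), ⟨by omega, by omega⟩, ?_⟩
    rw [g0, g1, g2]
    exact hlt

-- ===== VERDICT (by name: the statement is the Claim_ definition above) =====
theorem findTriangle_spec : Claim_equal_findTriangle := by
  intro A _
  unfold Spec_findTriangle findTriangle findTriangle_alt
  have hperm := PySem.List.sorted_perm A (fun x => x) false
  have hiff := (condA_iff A).trans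
    ((Iff.intro (hasTri_of_perm hperm.symm) (hasTri_of_perm hperm)).trans
      ((hasTri_srt_iff A).trans (condB_iff A).symm))
  simp only [srt] at hiff
  split_ifs with hA hB hB <;>
    first | rfl | exact absurd (hiff.mp hA) hB | exact absurd (hiff.mpr hB) hA
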